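-- pv_equiv track=rewrite | github.com/DivyanshiChouksey/Data-Structure-Algorithm | 857.Maximum Total Importance of Roads.py | maximumImportance
-- ===== SOURCE A (Python) =====
-- from typing import List
--
-- def maximumImportance(n: int, roads: List[List[int]]) -> int:
--     degree = [0] * n
--
--     for edge in roads:
--         degree[edge[0]] += 1
--         degree[edge[1]] += 1
--
--     degree.sort()
--
--     value = 1
--     total_importance = 0
--     for d in degree:
--         total_importance += value * d
--         value += 1
--
--     return total_importance
-- ===== SOURCE B (Python) =====
-- def maximumImportance(n, roads):
--     deg = [0] * n
--     for e in roads: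
--         deg[e[0]] += 1
--         deg[e[1]] += 1
--     if not deg:
--         return 0
--     cnt = {}
--     for d in deg:
--         cnt[d] = cnt.get(d, 0) + 1
--     total = 0
--     w = 1
--     for d in range(max(deg) + 1):
--         c = cnt.get(d, 0)
--         total += d * (c * w + c * (c - 1) // 2)
--         w += c
--     return total
-- ===== Notes on version B (the rewrite author's own statement) =====
-- stated objective: alternative
-- what changed: Replaces A's comparison sort of the degree list by a dict counter over degree values plus a closed-form sum of consecutive weights per degree bucket (counting-sort-style accumulation, no sort).
import Mathlib
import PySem

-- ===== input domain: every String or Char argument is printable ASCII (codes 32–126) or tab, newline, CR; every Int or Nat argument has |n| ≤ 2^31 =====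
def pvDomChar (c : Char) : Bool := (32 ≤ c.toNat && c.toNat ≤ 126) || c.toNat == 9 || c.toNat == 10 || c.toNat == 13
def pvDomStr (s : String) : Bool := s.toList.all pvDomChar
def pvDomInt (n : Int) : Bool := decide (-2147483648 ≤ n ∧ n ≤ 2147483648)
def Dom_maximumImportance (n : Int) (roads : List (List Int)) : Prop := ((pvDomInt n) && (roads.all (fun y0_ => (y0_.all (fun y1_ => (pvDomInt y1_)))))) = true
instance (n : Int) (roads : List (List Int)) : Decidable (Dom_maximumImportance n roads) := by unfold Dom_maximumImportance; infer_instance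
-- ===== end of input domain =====

-- B replaces A's comparison sort of the degree list by a degree-value counter and a
-- closed-form weighted sum per degree bucket (alternative algorithm, similar cost).


-- ===== PORT A =====
-- degree[edge[0]] += 1; degree[edge[1]] += 1 (in-range under Pre_)
def pvIncAt (dg : List Int) (i : Int) : List Int :=
  PySem.List.pySetD dg i (PySem.List.pyGetD dg i 0 + 1)

def maximumImportance (n : Int) (roads : List (List Int)) : Int :=
  let degree : List Int := List.replicate n.toNat 0
  let degree := roads.foldl (fun dg e =>
      pvIncAt (pvIncAt dg (PySem.List.pyGetD e 0 0)) (PySem.List.pyGetD e 1 0)) degree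
  let degree := PySem.List.sorted degree (fun x => x) false
  (degree.foldl (fun (s : Int × Int) d => (s.1 + s.2 * d, s.2 + 1)) (0, 1)).1

-- ===== PORT B =====
def maximumImportance_alt (n : Int) (roads : List (List Int)) : Int :=
  let deg : List Int := List.replicate n.toNat 0
  let deg := roads.foldl (fun dg e =>
      pvIncAt (pvIncAt dg (PySem.List.pyGetD e 0 0)) (PySem.List.pyGetD e 1 0)) deg
  if deg.isEmpty then 0
  else
    let cnt := deg.foldl (fun d x => d.insert x (d.getD x 0 + 1)) (PySem.Dict.empty : PySem.Dict Int Int)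
    let m : Int := match PySem.List.max? deg (fun x => x) with | some m => m | none => 0
    ((PySem.List.pyRange 0 (m + 1) 1).foldl (fun (s : Int × Int) d =>
        let c := cnt.getD d 0
        (s.1 + d * (c * s.2 + PySem.Int.floordiv (c * (c - 1)) 2), s.2 + c)) (0, 1)).1

-- ===== PRECONDITION & SPEC =====
-- Pre_: every edge has at least two entries and its first two entries are valid
-- (possibly negative) Python indices into the length-n degree list; exactly where A
-- does not raise an IndexError.
def Pre_maximumImportance (n : Int) (roads : List (List Int)) : Prop :=
  ∀ e ∈ roads, 2 ≤ e.length ∧ PySem.Raise.InRange n.toNat (e.getD 0 0)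
    ∧ PySem.Raise.InRange n.toNat (e.getD 1 0)
instance (n : Int) (roads : List (List Int)) : Decidable (Pre_maximumImportance n roads) := by unfold Pre_maximumImportance; infer_instance

def pvWitness_maximumImportance : Int × List (List Int) := (3, [[0, 1], [1, 2], [0, 2]])

def Spec_maximumImportance (n : Int) (roads : List (List Int)) (out : Int) : Prop := out = maximumImportance_alt n roads
instance (n : Int) (roads : List (List Int)) (out : Int) : Decidable (Spec_maximumImportance n roads out) := by unfold Spec_maximumImportance; infer_instance

-- ===== CLAIM (what is proved, stated in full; the proofs are below) =====
def Claim_equal_maximumImportance : Prop := ∀ (n : Int) (roads : List (List Int)), Dom_maximumImportance n roads → Pre_maximumImportance n roads → Spec_maximumImportance n roads (maximumImportance n roads)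

-- ===== LEMMAS AND PROOFS =====

-- the counting-sort order of a nonnegative list
def pvBuckets (deg : List Int) (M : Nat) : List Int :=
  (List.range M).flatMap (fun (d : Nat) => List.replicate (deg.count ((d : Nat) : Int)) ((d : Nat) : Int))

-- elements of the built degree list stay nonnegative
theorem mem_pvIncAt (dg : List Int) (i : Int) (x : Int) (hx : x ∈ pvIncAt dg i) :
    x ∈ dg ∨ x = PySem.List.pyGetD dg i 0 + 1 := by
  unfold pvIncAt PySem.List.pySetD PySem.List.pySet? at hx
  cases h : PySem.List.pyIdx? dg.length i with
  | none => simp [h] at hx; exact Or.inl hx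
  | some j =>
      simp [h] at hx
      rcases List.mem_or_eq_of_mem_set hx with h' | h'
      · exact Or.inl h'
      · exact Or.inr h'

theorem pyGetD_nonneg (dg : List Int) (i : Int) (h : ∀ x ∈ dg, 0 ≤ x) :
    0 ≤ PySem.List.pyGetD dg i 0 := by
  unfold PySem.List.pyGetD
  cases hg : PySem.List.pyGet? dg i with
  | none => simp
  | some v => simpa using h v (PySem.List.mem_of_pyGet?_eq_some dg hg)

theorem pvIncAt_nonneg (dg : List Int) (i : Int) (h : ∀ x ∈ dg, 0 ≤ x) :
    ∀ x ∈ pvIncAt dg i, 0 ≤ x := by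
  intro x hx
  rcases mem_pvIncAt dg i x hx with h' | h'
  · exact h x h'
  · have := pyGetD_nonneg dg i h; omega

theorem buildDeg_nonneg (roads : List (List Int)) (dg : List Int) (h : ∀ x ∈ dg, 0 ≤ x) :
    ∀ x ∈ roads.foldl (fun dg e =>
        pvIncAt (pvIncAt dg (PySem.List.pyGetD e 0 0)) (PySem.List.pyGetD e 1 0)) dg, 0 ≤ x := by
  induction roads generalizing dg with
  | nil => exact h
  | cons e rs ih =>
      exact ih _ (pvIncAt_nonneg _ _ (pvIncAt_nonneg _ _ h))

theorem count_pvBuckets (deg : List Int) (M : Nat) (v : Int) :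
    (pvBuckets deg M).count v = if 0 ≤ v ∧ v < (M : Int) then deg.count v else 0 := by
  induction M with
  | zero =>
      have : ¬ (0 ≤ v ∧ v < ((0 : Nat) : Int)) := by push_cast; omega
      simp [pvBuckets]
  | succ M ih =>
      unfold pvBuckets at *
      rw [List.range_succ, List.flatMap_append, List.count_append, ih]
      simp only [List.flatMap_cons, List.flatMap_nil, List.append_nil, List.count_replicate]
      by_cases hv : v = (M : Int)
      · subst hv
        have h1 : ¬ (0 ≤ (M : Int) ∧ (M : Int) < (M : Int)) := by omega
        have h2 : 0 ≤ (M : Int) ∧ (M : Int) < ((M + 1 : Nat) : Int) := by push_cast; omega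
        rw [if_neg h1, if_pos h2]
        simp
      · have h3 : ¬ ((M : Int) == v) = true := by simpa using fun h => hv h.symm
        rw [if_neg h3, add_zero]
        have h4 : (0 ≤ v ∧ v < (M : Int)) ↔ (0 ≤ v ∧ v < ((M + 1 : Nat) : Int)) := by
          push_cast; omega
        rw [if_congr h4 rfl rfl]

theorem perm_pvBuckets (deg : List Int) (M : Nat)
    (h : ∀ x ∈ deg, 0 ≤ x ∧ x < (M : Int)) : (pvBuckets deg M).Perm deg := by
  rw [List.perm_iff_count]
  intro v
  rw [count_pvBuckets]
  by_cases hv : 0 ≤ v ∧ v < (M : Int)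
  · simp [hv]
  · simp only [hv, if_false]
    symm
    rw [List.count_eq_zero]
    intro hmem
    exact hv (h v hmem)

theorem pairwise_pvBuckets (deg : List Int) (M : Nat) :
    (pvBuckets deg M).Pairwise (· ≤ ·) := by
  induction M with
  | zero => simp [pvBuckets]
  | succ M ih =>
      unfold pvBuckets at *
      rw [List.range_succ, List.flatMap_append, List.pairwise_append]
      refine ⟨ih, ?_, ?_⟩
      · simp only [List.flatMap_cons, List.flatMap_nil, List.append_nil]
        exact List.pairwise_replicate.mpr (Or.inr le_rfl)
      · intro a ha b hb
        simp only [List.flatMap_cons, List.flatMap_nil, List.append_nil,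
          List.mem_replicate] at hb
        obtain ⟨-, hb⟩ := hb
        subst hb
        simp only [List.mem_flatMap, List.mem_range, List.mem_replicate] at ha
        obtain ⟨d, hd, -, ha⟩ := ha
        subst ha
        exact_mod_cast Nat.le_of_lt hd

theorem sorted_eq_pvBuckets (deg : List Int) (M : Nat)
    (h : ∀ x ∈ deg, 0 ≤ x ∧ x < (M : Int)) :
    PySem.List.sorted deg (fun x => x) false = pvBuckets deg M :=
  PySem.List.sorted_id_eq_of_perm_of_pairwise deg (pvBuckets deg M)
    (perm_pvBuckets deg M h) (pairwise_pvBuckets deg M)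

-- one bucket: A's per-element loop over k copies of d equals B's closed form
theorem bucket_closed_form (d : Int) (k : Nat) (s : Int × Int) :
    (List.replicate k d).foldl (fun (s : Int × Int) d => (s.1 + s.2 * d, s.2 + 1)) s
      = (s.1 + d * ((k : Int) * s.2 + PySem.Int.floordiv ((k : Int) * ((k : Int) - 1)) 2),
         s.2 + (k : Int)) := by
  induction k generalizing s with
  | zero => simp [PySem.Int.floordiv]
  | succ k ih =>
      rw [List.replicate_succ, List.foldl_cons, ih]
      have hdiv : PySem.Int.floordiv (((k : Int) + 1) * (k : Int)) 2
          = PySem.Int.floordiv ((k : Int) * ((k : Int) - 1)) 2 + (k : Int) := by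
        have h2 : ((k : Int) + 1) * (k : Int) = (k : Int) * ((k : Int) - 1) + (k : Int) * 2 := by
          ring
        simp only [PySem.Int.floordiv, Int.fdiv_eq_ediv]
        norm_num
        rw [h2, Int.add_mul_ediv_right _ _ (by norm_num : (2 : Int) ≠ 0)]
      simp only [Prod.mk.injEq]
      constructor
      · push_cast
        rw [show ((k : Int) + 1 - 1) = (k : Int) from by ring, hdiv]
        ring
      · push_cast
        ring

-- A's fold over the bucketed list equals B's per-bucket fold (cnt v = deg.count v)
theorem fold_buckets (deg : List Int) (M : Nat) (s : Int × Int)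
    (cnt : PySem.Dict Int Int) (hcnt : ∀ v, cnt.getD v 0 = (deg.count v : Int)) :
    (pvBuckets deg M).foldl (fun (s : Int × Int) d => (s.1 + s.2 * d, s.2 + 1)) s
      = (List.range M).foldl (fun (s : Int × Int) (k : Nat) =>
          let c := cnt.getD (k : Int) 0
          (s.1 + (k : Int) * (c * s.2 + PySem.Int.floordiv (c * (c - 1)) 2), s.2 + c)) s := by
  induction M generalizing s with
  | zero => simp [pvBuckets]
  | succ M ih =>
      unfold pvBuckets at *
      rw [List.range_succ, List.foldl_append, List.flatMap_append, List.foldl_append, ih]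
      simp only [List.flatMap_cons, List.flatMap_nil, List.append_nil, List.foldl_cons,
        List.foldl_nil]
      rw [bucket_closed_form]
      simp [hcnt]

-- main reduction: for a nonempty all-nonnegative degree list the two tails agree
theorem tails_agree (deg : List Int) (h0 : ∀ x ∈ deg, 0 ≤ x) (hne : deg.isEmpty = false) :
    ((PySem.List.sorted deg (fun x => x) false).foldl
        (fun (s : Int × Int) d => (s.1 + s.2 * d, s.2 + 1)) (0, 1)).1
      = (let cnt := deg.foldl (fun d x => d.insert x (d.getD x 0 + 1))
            (PySem.Dict.empty : PySem.Dict Int Int)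
         let m : Int := match PySem.List.max? deg (fun x => x) with | some m => m | none => 0
         ((PySem.List.pyRange 0 (m + 1) 1).foldl (fun (s : Int × Int) d =>
             let c := cnt.getD d 0
             (s.1 + d * (c * s.2 + PySem.Int.floordiv (c * (c - 1)) 2), s.2 + c)) (0, 1)).1) := by
  have hne' : deg ≠ [] := by simpa [List.isEmpty_iff] using hne
  obtain ⟨m, hm⟩ : ∃ m, PySem.List.max? deg (fun x => x) = some m := by
    cases h : PySem.List.max? deg (fun x => x) with
    | none => exact absurd ((PySem.List.max?_eq_none_iff deg _).mp h) hne'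
    | some m => exact ⟨m, rfl⟩
  have hm0 : 0 ≤ m := h0 m (PySem.List.max?_mem hm)
  have hmax : ∀ y ∈ deg, y ≤ m := fun y hy => PySem.List.max?_isMax hm y hy
  have hbound : ∀ x ∈ deg, 0 ≤ x ∧ x < ((m.toNat + 1 : Nat) : Int) := by
    intro x hx
    have h1 := h0 x hx
    have h2 := hmax x hx
    constructor
    · exact h1
    · push_cast; omega
  have hcnt : ∀ v, (deg.foldl (fun d x => d.insert x (d.getD x 0 + 1))
      (PySem.Dict.empty : PySem.Dict Int Int)).getD v 0 = (deg.count v : Int) := by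
    intro v
    rw [PySem.Dict.getD_foldl_insert_add_one]
    simp
  simp only [hm]
  rw [sorted_eq_pvBuckets deg (m.toNat + 1) hbound]
  rw [fold_buckets deg (m.toNat + 1) (0, 1) _ hcnt]
  have hM : m + 1 = ((m.toNat + 1 : Nat) : Int) := by omega
  rw [hM, PySem.List.pyRange_zero_natCast, List.foldl_map]

-- ===== VERDICT (by name: the statement is the Claim_ definition above) =====
theorem maximumImportance_spec : Claim_equal_maximumImportance := by
  intro n roads _ _
  unfold Spec_maximumImportance maximumImportance maximumImportance_alt
  simp only []
  set deg := roads.foldl (fun dg e =>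
      pvIncAt (pvIncAt dg (PySem.List.pyGetD e 0 0)) (PySem.List.pyGetD e 1 0))
      (List.replicate n.toNat (0 : Int)) with hdeg
  have h0 : ∀ x ∈ deg, 0 ≤ x := by
    rw [hdeg]
    exact buildDeg_nonneg roads _ (by simp)
  cases hne : deg.isEmpty with
  | true =>
      have hnil : deg = [] := List.isEmpty_iff.mp hne
      simp only [hnil]
      rfl
  | false =>
      rw [if_neg Bool.false_ne_true]
      exact tails_agree deg h0 hne
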